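-- pv_equiv track=rewrite | github.com/viggomeesters/transform-myd-minimal | transform_myd_minimal.py | is_constant_field
-- ===== SOURCE A (Python) =====
-- def is_constant_field(field_name, field_description):
--     """
--     Determine if a derived target field should be marked as constant.
--
--     Args:
--         field_name (str): The name of the field
--         field_description (str): The description of the field
--
--     Returns:
--         bool: True if field should be marked as constant, False otherwise
--     """
--     # Convert to lowercase for case-insensitive matching
--     name_lower = field_name.lower()
--     desc_lower = field_description.lower()
--
--     # Operational flag patterns in field names
--     operational_name_patterns = [
--         'overwrite', 'flag', 'control', 'indicator', 'switch',
--         'enable', 'disable', 'active', 'status'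
--     ]
--
--     # Operational flag patterns in descriptions
--     operational_desc_patterns = [
--         'overwrite', 'flag', 'operational', 'control', 'indicator',
--         'do not', 'block', 'prevent', 'enable', 'disable',
--         'switch', 'toggle', 'status'
--     ]
--
--     # Check field name patterns
--     for pattern in operational_name_patterns:
--         if pattern in name_lower:
--             return True
--
--     # Check description patterns
--     for pattern in operational_desc_patterns:
--         if pattern in desc_lower:
--             return True
--
--     return False
-- ===== SOURCE B (Python) =====
-- _NAME_PATTERNS = [
--     'overwrite', 'flag', 'control', 'indicator', 'switch',
--     'enable', 'disable', 'active', 'status'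
-- ]
--
-- _DESC_PATTERNS = [
--     'overwrite', 'flag', 'operational', 'control', 'indicator',
--     'do not', 'block', 'prevent', 'enable', 'disable',
--     'switch', 'toggle', 'status'
-- ]
--
--
-- def _nfa_scan(text, patterns):
--     """Single forward pass over the string simulating the set-of-suffixes NFA:
--     'active' holds the remaining suffixes of every pattern whose start has
--     matched so far; each character advances (or drops) every active suffix and
--     injects fresh pattern starts; a suffix shrinking to '' means a full match."""
--     active = set()
--     for ch in text.lower():
--         active = {p[1:] for p in (active | set(patterns)) if p and p[0] == ch}
--         if '' in active:
--             return True
--     return False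
--
--
-- def is_constant_field(field_name, field_description):
--     return _nfa_scan(field_name, _NAME_PATTERNS) or _nfa_scan(field_description, _DESC_PATTERNS)
-- ===== Notes on version B (the rewrite author's own statement) =====
-- stated objective: alternative
-- what changed: Replaces A's per-pattern 'p in s' substring tests by a single forward pass that simulates a set-of-suffixes NFA (Brzozowski-derivative multi-pattern matcher): it maintains the set of active pattern suffixes, advancing or dropping each on every character and detecting a match when a suffix empties, so each string is traversed exactly once with no per-pattern rescans.
import Mathlib
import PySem

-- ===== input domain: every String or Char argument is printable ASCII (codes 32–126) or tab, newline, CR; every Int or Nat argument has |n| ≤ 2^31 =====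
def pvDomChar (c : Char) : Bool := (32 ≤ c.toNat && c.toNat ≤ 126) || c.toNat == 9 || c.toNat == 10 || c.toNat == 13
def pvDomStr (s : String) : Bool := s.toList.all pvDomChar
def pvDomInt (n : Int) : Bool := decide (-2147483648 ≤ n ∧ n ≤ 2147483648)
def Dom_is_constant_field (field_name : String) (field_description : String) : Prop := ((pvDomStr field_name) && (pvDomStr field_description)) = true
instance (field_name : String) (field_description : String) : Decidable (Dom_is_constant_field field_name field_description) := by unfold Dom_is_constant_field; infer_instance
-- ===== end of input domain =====

-- B replaces A's per-pattern substring tests by a single forward pass simulating a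
-- set-of-suffixes NFA over each string (objective: alternative).

-- ===== PORT A =====
def operationalNamePatterns : List String :=
  ["overwrite", "flag", "control", "indicator", "switch",
   "enable", "disable", "active", "status"]

def operationalDescPatterns : List String :=
  ["overwrite", "flag", "operational", "control", "indicator",
   "do not", "block", "prevent", "enable", "disable",
   "switch", "toggle", "status"]

-- each for-loop with early 'return True' is the List.any over the pattern list
def is_constant_field (field_name : String) (field_description : String) : Bool :=
  let name_lower := PySem.Str.lower field_name
  let desc_lower := PySem.Str.lower field_description
  (operationalNamePatterns.any (fun p => PySem.Str.isIn p name_lower)) ||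
  (operationalDescPatterns.any (fun p => PySem.Str.isIn p desc_lower))

-- ===== PORT B =====
def altNamePatterns : List (List Char) :=
  ["overwrite".toList, "flag".toList, "control".toList, "indicator".toList, "switch".toList,
   "enable".toList, "disable".toList, "active".toList, "status".toList]

def altDescPatterns : List (List Char) :=
  ["overwrite".toList, "flag".toList, "operational".toList, "control".toList, "indicator".toList,
   "do not".toList, "block".toList, "prevent".toList, "enable".toList, "disable".toList,
   "switch".toList, "toggle".toList, "status".toList]

-- the set comprehension {p[1:] for p in (active | set(patterns)) if p and p[0] == ch}:
-- 'p and p[0] == ch' is 'p.head? == some ch'; the result is a Python set (PySem.Set)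
def nfaStep (pats : List (List Char)) (active : PySem.Set (List Char)) (c : Char) :
    PySem.Set (List Char) :=
  PySem.Set.ofList
    ((((PySem.Set.union active pats : List (List Char))).filter
        (fun p => p.head? == some c)).map List.tail)

-- the 'for ch in text.lower()' loop with its early 'return True'
def nfaScanAux (pats : List (List Char)) : List Char → PySem.Set (List Char) → Bool
  | [], _ => false
  | c :: rest, active =>
      let active' := nfaStep pats active c
      if ([] : List Char) ∈ active' then true else nfaScanAux pats rest active'

def nfaScan (text : String) (pats : List (List Char)) : Bool :=
  nfaScanAux pats (PySem.Str.lower text).toList PySem.Set.empty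

def is_constant_field_alt (field_name : String) (field_description : String) : Bool :=
  nfaScan field_name altNamePatterns || nfaScan field_description altDescPatterns

-- ===== PRECONDITION & SPEC =====
def Spec_is_constant_field (field_name : String) (field_description : String) (out : Bool) : Prop := out = is_constant_field_alt field_name field_description
instance (field_name : String) (field_description : String) (out : Bool) : Decidable (Spec_is_constant_field field_name field_description out) := by unfold Spec_is_constant_field; infer_instance

-- ===== CLAIM =====
def Claim_equal_is_constant_field : Prop := ∀ (field_name : String) (field_description : String), Dom_is_constant_field field_name field_description → Spec_is_constant_field field_name field_description (is_constant_field field_name field_description)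

-- ===== LEMMAS AND PROOFS =====

-- membership in one NFA step: x survives iff it is the tail of a source suffix whose head is c
theorem mem_nfaStep (pats : List (List Char)) (active : PySem.Set (List Char)) (c : Char)
    (x : List Char) :
    x ∈ nfaStep pats active c ↔
      ∃ q, (q ∈ active ∨ q ∈ pats) ∧ q.head? = some c ∧ q.tail = x := by
  unfold nfaStep
  simp only [PySem.Set.mem_ofList, List.mem_map, List.mem_filter, PySem.Set.mem_union,
    beq_iff_eq]
  constructor
  · rintro ⟨q, ⟨hq, hh⟩, ht⟩; exact ⟨q, hq, hh, ht⟩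
  · rintro ⟨q, hq, hh, ht⟩; exact ⟨q, ⟨hq, hh⟩, ht⟩

-- the scan is true iff an active suffix is a prefix of the rest or a pattern occurs in it
theorem nfaScanAux_iff (pats : List (List Char)) (hp : ∀ p ∈ pats, p ≠ [])
    (t : List Char) :
    ∀ (active : PySem.Set (List Char)), (∀ a ∈ active, a ≠ ([] : List Char)) →
      (nfaScanAux pats t active = true ↔
        (∃ a ∈ active, a <+: t) ∨ (∃ p ∈ pats, p <:+: t)) := by
  induction t with
  | nil =>
      intro active ha
      simp only [nfaScanAux]
      constructor
      · intro h; cases h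
      · rintro (⟨a, haa, hpre⟩ | ⟨p, hpp, hinf⟩)
        · exact absurd (List.prefix_nil.mp hpre) (ha a haa)
        · exact absurd (List.infix_nil.mp hinf) (hp p hpp)
  | cons c rest ih =>
      intro active ha
      simp only [nfaScanAux]
      by_cases hnil : ([] : List Char) ∈ nfaStep pats active c
      · simp only [hnil, if_pos]
        constructor
        · intro _
          rcases (mem_nfaStep pats active c []).mp hnil with ⟨q, hq, hh, ht⟩
          have hqc : q = [c] := by
            cases q with
            | nil => simp at hh
            | cons b bs =>
                simp only [List.head?_cons, Option.some.injEq] at hh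
                simp only [List.tail_cons] at ht
                rw [hh, ht]
          rcases hq with hq | hq
          · exact Or.inl ⟨q, hq, by rw [hqc]; exact ⟨rest, rfl⟩⟩
          · exact Or.inr ⟨q, hq, by rw [hqc]; exact ⟨[], rest, rfl⟩⟩
        · intro _; trivial
      · simp only [hnil, if_false]
        have ha' : ∀ a ∈ nfaStep pats active c, a ≠ ([] : List Char) := by
          intro a haa he; exact hnil (he ▸ haa)
        rw [ih (nfaStep pats active c) ha']
        constructor
        · rintro (⟨a', ha'', hpre⟩ | ⟨p, hpp, hinf⟩)
          · rcases (mem_nfaStep pats active c a').mp ha'' with ⟨q, hq, hh, ht⟩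
            have hq' : q = c :: a' := by
              cases q with
              | nil => simp at hh
              | cons b bs =>
                  simp only [List.head?_cons, Option.some.injEq] at hh
                  simp only [List.tail_cons] at ht
                  rw [hh, ht]
            rcases hq with hq | hq
            · exact Or.inl ⟨q, hq, by rw [hq']; exact List.cons_prefix_cons.mpr ⟨rfl, hpre⟩⟩
            · exact Or.inr ⟨q, hq, List.IsPrefix.isInfix (by rw [hq']; exact List.cons_prefix_cons.mpr ⟨rfl, hpre⟩)⟩
          · exact Or.inr ⟨p, hpp, hinf.trans (List.infix_cons (List.infix_refl rest))⟩
        · rintro (⟨a, haa, hpre⟩ | ⟨p, hpp, hinf⟩)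
          · cases a with
            | nil => exact absurd rfl (ha _ haa)
            | cons b bs =>
                rcases List.cons_prefix_cons.mp hpre with ⟨hb, hbs⟩
                refine Or.inl ⟨bs, (mem_nfaStep pats active c bs).mpr
                  ⟨b :: bs, Or.inl haa, by rw [hb]; rfl, rfl⟩, hbs⟩
          · rcases List.infix_cons_iff.mp hinf with hpre | hinf'
            · cases hpc : p with
              | nil => exact absurd hpc (hp p hpp)
              | cons b bs =>
                  subst hpc
                  rcases List.cons_prefix_cons.mp hpre with ⟨hb, hbs⟩
                  refine Or.inl ⟨bs, (mem_nfaStep pats active c bs).mpr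
                    ⟨b :: bs, Or.inr hpp, by rw [hb]; rfl, rfl⟩, hbs⟩
            · exact Or.inr ⟨p, hpp, hinf'⟩

theorem nfaScan_eq_any (text : String) (pats : List (List Char)) (hp : ∀ p ∈ pats, p ≠ []) :
    nfaScan text pats = pats.any (fun p => PySem.Chars.isIn p (PySem.Str.lower text).toList) := by
  rw [Bool.eq_iff_iff]
  unfold nfaScan
  rw [nfaScanAux_iff pats hp _ PySem.Set.empty (by intro a h; cases h)]
  simp only [List.any_eq_true, PySem.Chars.isIn_iff_infix, PySem.Set.empty]
  constructor
  · rintro (⟨a, h, _⟩ | h)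
    · cases h
    · exact h
  · exact Or.inr

theorem is_constant_field_eq (field_name field_description : String) :
    is_constant_field field_name field_description
      = is_constant_field_alt field_name field_description := by
  unfold is_constant_field is_constant_field_alt
  rw [nfaScan_eq_any _ _ (by decide), nfaScan_eq_any _ _ (by decide)]
  simp only [PySem.Str.isIn_eq, operationalNamePatterns, operationalDescPatterns,
    altNamePatterns, altDescPatterns, List.any_cons, List.any_nil]

-- ===== VERDICT =====
theorem is_constant_field_spec : Claim_equal_is_constant_field := by
  intro fn fd _
  unfold Spec_is_constant_field
  exact is_constant_field_eq fn fd
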